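-- pv_equiv track=rewrite | github.com/ZalviaInasya/TasteFind | backend/preprocessing.py | aggregate_tokens_frequency
-- ===== SOURCE A (Python) =====
-- def aggregate_tokens_frequency(tokens):
--     """
--     Return list token unik diurutkan berdasarkan frekuensi turun
--     """
--     if not tokens:
--         return []
--     freq = {}
--     for t in tokens:
--         freq[t] = freq.get(t, 0) + 1
--     # Urut berdasarkan frekuensi desc lalu alfabet asc
--     sorted_tokens = sorted(freq.items(), key=lambda x: (-x[1], x[0]))
--     return [t for t, _ in sorted_tokens]
-- ===== SOURCE B (Python) =====
-- def aggregate_tokens_frequency(tokens):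
--     """
--     Return list token unik diurutkan berdasarkan frekuensi turun
--     """
--     if not tokens:
--         return []
--     freq = {}
--     for t in tokens:
--         freq[t] = freq.get(t, 0) + 1
--     # invert into buckets: frequency -> tokens with that frequency
--     buckets = {}
--     for t, c in freq.items():
--         buckets.setdefault(c, []).append(t)
--     # walk frequency levels from the highest down, alphabetical inside a level
--     result = []
--     for f in range(max(freq.values()), 0, -1):
--         result.extend(sorted(buckets.get(f, [])))
--     return result
-- ===== Notes on version B (the rewrite author's own statement) =====
-- stated objective: alternative
-- what changed: Replaces the single sort of (token, count) pairs under the composite key (-count, token) by inverting the frequency dict into count->tokens buckets and walking the frequency levels from the maximum down, sorting each bucket alphabetically and concatenating.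
import Mathlib
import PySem

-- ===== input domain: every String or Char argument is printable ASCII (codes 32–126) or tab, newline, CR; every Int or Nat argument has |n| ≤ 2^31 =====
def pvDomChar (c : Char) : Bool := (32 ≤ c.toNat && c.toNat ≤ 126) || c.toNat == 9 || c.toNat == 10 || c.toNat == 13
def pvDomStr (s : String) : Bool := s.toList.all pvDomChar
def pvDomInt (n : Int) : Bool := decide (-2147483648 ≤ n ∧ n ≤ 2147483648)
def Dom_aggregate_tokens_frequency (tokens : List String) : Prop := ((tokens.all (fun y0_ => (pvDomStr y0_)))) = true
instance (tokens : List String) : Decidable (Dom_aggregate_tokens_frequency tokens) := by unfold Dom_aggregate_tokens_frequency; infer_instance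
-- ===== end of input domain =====

-- B replaces the single sort of (token, count) pairs by a frequency-bucket map walked
-- from the highest frequency level down, sorting each bucket alphabetically (objective: alternative).

-- ===== PORT A =====
-- the Python tuple key (-count, token) is ported as the lexicographic key toLex (-count, token),
-- exactly Python's tuple comparison (first components, then strings)
def aggregate_tokens_frequency (tokens : List String) : List String :=
  if tokens = [] then []
  else
    let freq : PySem.Dict String Int :=
      tokens.foldl (fun d t => d.insert t (d.getD t 0 + 1)) PySem.Dict.empty
    let sorted_tokens :=
      PySem.List.sorted freq.items (fun x => toLex (-x.2, x.1))
    sorted_tokens.map (fun p => p.1)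

-- ===== PORT B =====
def aggregate_tokens_frequency_alt (tokens : List String) : List String :=
  if tokens = [] then []
  else
    let freq : PySem.Dict String Int :=
      tokens.foldl (fun d t => d.insert t (d.getD t 0 + 1)) PySem.Dict.empty
    let buckets : PySem.Dict Int (List String) :=
      freq.items.foldl (fun d p => d.modify p.2 [] (fun l => l ++ [p.1])) PySem.Dict.empty
    match PySem.List.max? freq.values (fun v => v) with
    | none => []   -- unreachable: freq is nonempty since tokens ≠ []
    | some m =>
      (PySem.List.pyRange m 0 (-1)).foldl
        (fun acc f => acc ++ PySem.List.sorted (buckets.getD f []) (fun s => s)) []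

-- ===== PRECONDITION & SPEC =====
def Spec_aggregate_tokens_frequency (tokens : List String) (out : List String) : Prop := out = aggregate_tokens_frequency_alt tokens
instance (tokens : List String) (out : List String) : Decidable (Spec_aggregate_tokens_frequency tokens out) := by unfold Spec_aggregate_tokens_frequency; infer_instance

-- ===== CLAIM (what is proved, stated in full; the proofs are below) =====
def Claim_equal_aggregate_tokens_frequency : Prop := ∀ (tokens : List String), Dom_aggregate_tokens_frequency tokens → Spec_aggregate_tokens_frequency tokens (aggregate_tokens_frequency tokens)

-- ===== LEMMAS AND PROOFS =====

-- range(m, 0, -1) is [m, m-1, …, 1]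
theorem pyRange_down (m : Int) (hm : 0 < m) :
    PySem.List.pyRange m 0 (-1) = (List.range m.toNat).map (fun k : Nat => m - (k : Int)) := by
  simp only [PySem.List.pyRange]
  norm_num [hm]
  intro a _
  ring

theorem mem_pyRange_down (m f : Int) (hm : 0 < m) :
    f ∈ PySem.List.pyRange m 0 (-1) ↔ 1 ≤ f ∧ f ≤ m := by
  rw [pyRange_down m hm]
  simp only [List.mem_map, List.mem_range]
  constructor
  · rintro ⟨k, hk, rfl⟩; omega
  · rintro ⟨h1, h2⟩; exact ⟨(m - f).toNat, by omega, by omega⟩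

theorem pairwise_gt_pyRange_down (m : Int) (hm : 0 < m) :
    (PySem.List.pyRange m 0 (-1)).Pairwise (· > ·) := by
  rw [pyRange_down m hm, List.pairwise_map]
  exact List.pairwise_lt_range.imp (by intro a b h; simp only [gt_iff_lt]; omega)

-- partitioning a list by the (distinct, exhaustive) values of a projection is a permutation
theorem perm_flatMap_filter {α : Type} [DecidableEq α] (c : α → Int) :
    ∀ (F : List Int) (S : List α), F.Nodup → (∀ t ∈ S, c t ∈ F) →
      (F.flatMap (fun f => S.filter (fun t => c t == f))).Perm S := by
  intro F
  induction F with
  | nil =>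
      intro S _ hall
      have : S = [] := List.eq_nil_iff_forall_not_mem.mpr (fun x hx => by simpa using hall x hx)
      simp [this]
  | cons f F' ih =>
      intro S hnd hall
      rw [List.flatMap_cons]
      have hS' : ∀ f' ∈ F', S.filter (fun t => c t == f') =
          (S.filter (fun t => !(c t == f))).filter (fun t => c t == f') := by
        intro f' hf'
        rw [List.filter_filter]
        apply List.filter_congr
        intro t _
        have : f ≠ f' := fun h => (List.nodup_cons.mp hnd).1 (h ▸ hf')
        by_cases h : c t = f'
        · simp [h]
          omega
        · simp [h, beq_iff_eq]
      have hcg : F'.flatMap (fun f' => S.filter (fun t => c t == f')) =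
          F'.flatMap (fun f' => (S.filter (fun t => !(c t == f))).filter (fun t => c t == f')) :=
        List.flatMap_congr hS'
      rw [hcg]
      have hperm := ih (S.filter (fun t => !(c t == f))) (List.nodup_cons.mp hnd).2 (by
        intro t ht
        have ht' := List.of_mem_filter ht
        have htS := List.mem_of_mem_filter ht
        have := hall t htS
        simp only [List.mem_cons] at this
        rcases this with h | h
        · exfalso; simp [h] at ht'
        · exact h)
      exact (hperm.append_left (S.filter (fun t => c t == f))).trans
        (List.filter_append_perm (fun t => c t == f) S)

-- pairwise over a flatMap from pairwise chunks and a cross relation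
theorem pairwise_flatMap_of {α β : Type} (R : β → β → Prop) (Q : α → α → Prop)
    (g : α → List β) :
    ∀ (F : List α), F.Pairwise Q → (∀ a ∈ F, (g a).Pairwise R) →
      (∀ a b, Q a b → ∀ x ∈ g a, ∀ y ∈ g b, R x y) →
      (F.flatMap g).Pairwise R := by
  intro F
  induction F with
  | nil => intro _ _ _; simp
  | cons a F' ih =>
      intro hQ hin hcross
      rw [List.flatMap_cons, List.pairwise_append]
      refine ⟨hin a (by simp), ih (List.pairwise_cons.mp hQ).2
        (fun b hb => hin b (by simp [hb])) hcross, ?_⟩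
      intro x hx y hy
      rw [List.mem_flatMap] at hy
      obtain ⟨b, hb, hyb⟩ := hy
      exact hcross a b ((List.pairwise_cons.mp hQ).1 b hb) x hx y hyb

theorem flatMap_perm_congr {α β : Type} (g g' : α → List β) :
    ∀ (F : List α), (∀ a ∈ F, (g a).Perm (g' a)) → (F.flatMap g).Perm (F.flatMap g') := by
  intro F
  induction F with
  | nil => intro _; simp
  | cons a F' ih =>
      intro h
      rw [List.flatMap_cons, List.flatMap_cons]
      exact (h a (by simp)).append (ih (fun b hb => h b (by simp [hb])))

-- ===== VERDICT (by name: the statement is the Claim_ definition above) =====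
theorem aggregate_tokens_frequency_spec : Claim_equal_aggregate_tokens_frequency := by
  intro tokens _
  unfold Spec_aggregate_tokens_frequency aggregate_tokens_frequency aggregate_tokens_frequency_alt
  by_cases hnil : tokens = []
  · simp [hnil]
  simp only [if_neg hnil]
  rw [PySem.Dict.foldl_insert_getD_add_one_eq_counter]
  rw [PySem.Dict.items_counter]
  set S : List String := PySem.Set.ofList tokens with hS
  set g : String → String × Int := fun k => (k, (List.count k tokens : Int)) with hg
  have hSnd : S.Nodup := PySem.Set.nodup_ofList tokens
  have hmemS : ∀ t, t ∈ S ↔ t ∈ tokens := PySem.Set.mem_ofList tokens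
  -- freq.values = the counts of the distinct tokens
  have hvals : (PySem.Dict.counter tokens).values = S.map (fun k => (List.count k tokens : Int)) := by
    simp only [PySem.Dict.values, PySem.Dict.items_counter, List.map_map, Function.comp_def]
    rfl
  rw [hvals]
  have hSne : S ≠ [] := by
    cases htk : tokens with
    | nil => exact absurd htk hnil
    | cons t ts =>
        intro h
        have : t ∈ S := (hmemS t).mpr (by simp [htk])
        simp [h] at this
  -- the maximum frequency exists
  rcases hmax : PySem.List.max? (S.map (fun k => (List.count k tokens : Int))) (fun v => v) with _ | m
  · exfalso
    exact hSne (List.map_eq_nil_iff.mp ((PySem.List.max?_eq_none_iff _ _).mp hmax))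
  have hm1 : 1 ≤ m := by
    have hmem := PySem.List.max?_mem hmax
    obtain ⟨k, hk, hkm⟩ := List.mem_map.mp hmem
    have : k ∈ tokens := (hmemS k).mp hk
    have := List.count_pos_iff.mpr this
    omega
  have hm0 : 0 < m := by omega
  have hle : ∀ k ∈ S, (List.count k tokens : Int) ≤ m := by
    intro k hk
    exact PySem.List.max?_isMax hmax _ (List.mem_map_of_mem hk)
  -- the buckets dict looks up to a filter of the distinct tokens
  have hbucket : ∀ f : Int,
      (List.foldl (fun d p => d.modify p.2 [] fun l => l ++ [p.1]) PySem.Dict.empty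
        (S.map g)).getD f []
      = S.filter (fun k => (List.count k tokens : Int) == f) := by
    intro f
    rw [List.foldl_map]
    have hsw : List.foldl (fun d k => d.modify (g k).2 [] fun l => l ++ [(g k).1])
        PySem.Dict.empty S
        = List.foldl (fun d p => d.modify p.1 [] fun l => l ++ [p.2]) PySem.Dict.empty
            (S.map (fun k => ((List.count k tokens : Int), k))) := by
      rw [List.foldl_map]
    rw [hsw, PySem.Dict.getD_foldl_modify_append]
    simp [List.filter_map, List.map_map, Function.comp_def]
  -- the single lexicographic sort equals the descending bucket walk
  have hsorted : PySem.List.sorted (S.map g) (fun x => toLex (-x.2, x.1))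
      = (PySem.List.pyRange m 0 (-1)).flatMap
          (fun f => (PySem.List.sorted
              (S.filter (fun k => (List.count k tokens : Int) == f)) (fun s => s)).map
            (fun t => (t, f))) := by
    apply PySem.List.sorted_eq_of_perm_of_pairwise_lt
    · -- permutation
      have hFnd : (PySem.List.pyRange m 0 (-1)).Nodup :=
        (pairwise_gt_pyRange_down m hm0).imp (fun h => (ne_of_lt h).symm)
      have hallin : ∀ t ∈ S, ((List.count t tokens : Int)) ∈ PySem.List.pyRange m 0 (-1) := by
        intro t ht
        refine (mem_pyRange_down m _ hm0).mpr ⟨?_, hle t ht⟩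
        have := List.count_pos_iff.mpr ((hmemS t).mp ht)
        omega
      have h2 := flatMap_perm_congr
        (fun f => (PySem.List.sorted
            (S.filter (fun k => (List.count k tokens : Int) == f)) (fun s => s)).map
          (fun t => (t, f)))
        (fun f => (S.filter (fun k => (List.count k tokens : Int) == f)).map (fun t => (t, f)))
        (PySem.List.pyRange m 0 (-1))
        (fun f _ => (PySem.List.sorted_perm _ _ _).map _)
      have h3 : (PySem.List.pyRange m 0 (-1)).flatMap
            (fun f => (S.filter (fun k => (List.count k tokens : Int) == f)).map (fun t => (t, f)))
          = (PySem.List.pyRange m 0 (-1)).flatMap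
            (fun f => (S.filter (fun k => (List.count k tokens : Int) == f)).map g) := by
        apply List.flatMap_congr
        intro f _
        apply List.map_congr_left
        intro t ht
        have := List.of_mem_filter ht
        rw [beq_iff_eq] at this
        simp [hg, this]
      have h5 := (perm_flatMap_filter (fun k => (List.count k tokens : Int))
        (PySem.List.pyRange m 0 (-1)) S hFnd hallin).map g
      rw [List.map_flatMap] at h5
      exact h2.trans (h3 ▸ h5)
    · -- strictly increasing keys
      apply pairwise_flatMap_of _ (· > ·)
      · exact pairwise_gt_pyRange_down m hm0
      · intro f _
        rw [List.pairwise_map]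
        have hnd : (S.filter (fun k => (List.count k tokens : Int) == f)).Nodup :=
          hSnd.filter _
        have hsortnd : (PySem.List.sorted
            (S.filter (fun k => (List.count k tokens : Int) == f)) (fun s => s)).Nodup :=
          (PySem.List.sorted_perm _ _ _).nodup_iff.mpr hnd
        have hpw := PySem.List.sorted_pairwise
          (S.filter (fun k => (List.count k tokens : Int) == f)) (fun s => s)
        refine (hpw.and hsortnd).imp ?_
        rintro a b ⟨hab, hne⟩
        exact Prod.Lex.toLex_lt_toLex.mpr (Or.inr ⟨rfl, lt_of_le_of_ne hab hne⟩)
      · intro a b hab x hx y hy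
        obtain ⟨t, _, rfl⟩ := List.mem_map.mp hx
        obtain ⟨t', _, rfl⟩ := List.mem_map.mp hy
        exact Prod.Lex.toLex_lt_toLex.mpr (Or.inl (by simpa using hab))
  rw [hsorted]
  simp only [PySem.List.foldl_append_eq_flatMap, List.nil_append, List.map_flatMap]
  apply List.flatMap_congr
  intro f _
  rw [hbucket f]
  simp [Function.comp_def]
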